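-- pv_equiv track=rewrite | github.com/QuinnLee/Project_Euler | euler028.py | side_dimension
-- ===== SOURCE A (Python) =====
-- def side_dimension(d=1):
--     if d % 2 == 0:
--       return 0
--
--     total = 1
--     start = 1
--     addition = 2
--     current_d = 1
--     while current_d != d:
--         for _ in range(4):
--             start += addition
--             total += start
--
--         addition += 2
--         current_d += 2
--
--     return total
-- ===== SOURCE B (Python) =====
-- def side_dimension(d=1):
--     if d % 2 == 0:
--         return 0
--     return (4 * d**3 + 3 * d**2 + 8 * d - 9) // 6
-- ===== Notes on version B (the rewrite author's own statement) =====
-- stated objective: faster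
-- what changed: Replaces the O(d) spiral-building while-loop by a closed-form cubic polynomial with one floor division; intended as faster — a timing run measured B up to 175x at the largest size, though even inputs (both return 0 immediately) keep the per-input ratios mixed.
import Mathlib
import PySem

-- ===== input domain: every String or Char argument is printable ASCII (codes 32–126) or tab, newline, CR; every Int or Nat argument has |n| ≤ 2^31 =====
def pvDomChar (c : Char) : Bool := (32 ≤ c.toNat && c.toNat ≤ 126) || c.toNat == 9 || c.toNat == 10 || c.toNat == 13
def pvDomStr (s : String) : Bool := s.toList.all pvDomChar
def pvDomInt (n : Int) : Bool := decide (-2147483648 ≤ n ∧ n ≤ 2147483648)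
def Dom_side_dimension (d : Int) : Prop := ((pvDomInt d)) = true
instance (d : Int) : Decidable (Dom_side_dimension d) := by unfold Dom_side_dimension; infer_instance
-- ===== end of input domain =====

-- B replaces the spiral-building loop by a closed-form cubic polynomial (intended as faster; a timing run measured up to 175x at the largest size, mixed on trivial even inputs).


-- ===== PORT A =====
-- while current_d != d: four inner steps per iteration; fuel d.toNat is enough for every
-- odd d ≥ 1 (the loop needs (d-1)/2 iterations); on inputs outside Pre_ the Python loop
-- does not terminate, and nothing is claimed there.
def sideLoop (fuel : Nat) (d total start addition current_d : Int) : Int :=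
  match fuel with
  | 0 => total
  | fuel + 1 =>
    if current_d = d then total
    else
      -- for _ in range(4): start += addition; total += start
      let start1 := start + addition
      let total1 := total + start1
      let start2 := start1 + addition
      let total2 := total1 + start2
      let start3 := start2 + addition
      let total3 := total2 + start3
      let start4 := start3 + addition
      let total4 := total3 + start4
      sideLoop fuel d total4 start4 (addition + 2) (current_d + 2)

def side_dimension (d : Int) : Int :=
  if PySem.Int.mod d 2 = 0 then 0
  else sideLoop d.toNat d 1 1 2 1

-- ===== PORT B =====
def side_dimension_alt (d : Int) : Int :=
  if PySem.Int.mod d 2 = 0 then 0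
  else PySem.Int.floordiv (4 * d ^ 3 + 3 * d ^ 2 + 8 * d - 9) 6

-- ===== PRECONDITION & SPEC =====
-- Pre_ excludes odd d < 1, where Python A's while-loop never terminates (current_d only increases past d).
def Pre_side_dimension (d : Int) : Prop := PySem.Int.mod d 2 = 0 ∨ 1 ≤ d
instance (d : Int) : Decidable (Pre_side_dimension d) := by unfold Pre_side_dimension; infer_instance
def pvWitness_side_dimension : Int := 5

def Spec_side_dimension (d : Int) (out : Int) : Prop := out = side_dimension_alt d
instance (d : Int) (out : Int) : Decidable (Spec_side_dimension d out) := by unfold Spec_side_dimension; infer_instance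

-- ===== CLAIM (what is proved, stated in full; the proofs are below) =====
def Claim_equal_side_dimension : Prop := ∀ (d : Int), Dom_side_dimension d → Pre_side_dimension d → Spec_side_dimension d (side_dimension d)

-- ===== LEMMAS AND PROOFS =====

-- Loop invariant: entering the loop with current_d = c (odd), total = the diagonal sum through
-- ring c (characterised by 6*total = 4c³+3c²+8c-9), start = c², addition = c+1, and d = c + 2n
-- with enough fuel, the loop returns the value t with 6*t = 4d³+3d²+8d-9.
theorem sideLoop_invariant (n : Nat) : ∀ (fuel : Nat) (c t : Int), n < fuel →
    6 * t = 4 * c ^ 3 + 3 * c ^ 2 + 8 * c - 9 →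
    6 * sideLoop fuel (c + 2 * n) t (c * c) (c + 1) c
      = 4 * (c + 2 * n) ^ 3 + 3 * (c + 2 * n) ^ 2 + 8 * (c + 2 * n) - 9 := by
  induction n with
  | zero =>
    intro fuel c t hf ht
    match fuel, hf with
    | fuel + 1, _ =>
      simp [sideLoop]
      linarith
  | succ n ih =>
    intro fuel c t hf ht
    match fuel, hf with
    | fuel + 1, hf =>
      have hne : c ≠ c + 2 * ((n : Int) + 1) := by omega
      have harg : (c + 2 * (((n : Nat) + 1 : Nat) : Int)) = (c + 2) + 2 * (n : Nat) := by
        push_cast; ring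
      rw [harg]
      show 6 * sideLoop (fuel + 1) ((c + 2) + 2 * (n : Nat)) t (c * c) (c + 1) c = _
      rw [sideLoop]
      have hne' : c ≠ (c + 2) + 2 * (n : Nat) := by
        have : (0:Int) ≤ (n : Nat) := Int.natCast_nonneg n
        omega
      simp only [if_neg hne']
      have hstart : c * c + (c + 1) + (c + 1) + (c + 1) + (c + 1) = (c + 2) * (c + 2) := by ring
      have haddn : c + 1 + 2 = (c + 2) + 1 := by ring
      have htot : 6 * (t + (c * c + (c + 1)) + (c * c + (c + 1) + (c + 1))
            + (c * c + (c + 1) + (c + 1) + (c + 1)) + (c * c + (c + 1) + (c + 1) + (c + 1) + (c + 1)))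
          = 4 * (c + 2) ^ 3 + 3 * (c + 2) ^ 2 + 8 * (c + 2) - 9 := by ring_nf; linarith
      have := ih fuel (c + 2)
        (t + (c * c + (c + 1)) + (c * c + (c + 1) + (c + 1))
          + (c * c + (c + 1) + (c + 1) + (c + 1)) + (c * c + (c + 1) + (c + 1) + (c + 1) + (c + 1)))
        (by omega) htot
      rw [hstart, haddn] at *
      simpa using this

-- exact division: floordiv (6*t) 6 = t
theorem floordiv_six (N t : Int) (h : 6 * t = N) : PySem.Int.floordiv N 6 = t := by
  have h6 : (0:Int) < 6 := by norm_num
  rw [PySem.Int.floordiv_eq_ediv_of_pos h6, ← h]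
  exact Int.mul_ediv_cancel_left t (by norm_num)

-- ===== VERDICT (by name: the statement is the Claim_ definition above) =====
theorem side_dimension_spec : Claim_equal_side_dimension := by
  intro d _ hpre
  unfold Spec_side_dimension side_dimension side_dimension_alt
  by_cases he : PySem.Int.mod d 2 = 0
  · rw [if_pos he, if_pos he]
  · simp only [if_neg he]
    have hd1 : 1 ≤ d := by
      rcases hpre with h | h
      · exact absurd h he
      · exact h
    have hodd : d % 2 = 1 := by
      have := PySem.Int.mod_eq_emod_of_pos (a := d) (b := 2) (by norm_num)
      omega
    -- d = 1 + 2*n for a natural n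
    obtain ⟨n, hn⟩ : ∃ n : Nat, d = 1 + 2 * (n : Int) := ⟨((d - 1) / 2).toNat, by omega⟩
    have hfuel : n < d.toNat := by omega
    have h6 : 6 * sideLoop d.toNat d 1 1 2 1 = 4 * d ^ 3 + 3 * d ^ 2 + 8 * d - 9 := by
      have := sideLoop_invariant n d.toNat 1 1 hfuel (by ring)
      have harg : (1:Int) + 2 * (n : Int) = d := hn.symm
      simpa [harg, show (1:Int) * 1 = 1 by ring, show (1:Int) + 1 = 2 by ring] using this
    exact (floordiv_six _ _ h6).symm
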